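-- pv_equiv track=rewrite | github.com/tjsdud594/Algorithm | basic/programmers/LostSportswear.py | solution
-- ===== SOURCE A (Python) =====
-- def solution(n, lost, reserve):
--     af_lost = sorted(list(set(lost)-set(reserve)))
--     af_reserve = sorted(list(set(reserve)-set(lost)))
--
--     answer=n-len(af_lost)
--
--     for num in af_lost:
--         front_num = num-1
--         back_num = num+1
--         if (front_num) in af_reserve:
--             af_reserve.remove(front_num)
--             answer+=1
--         elif (back_num) in af_reserve:
--             af_reserve.remove(back_num)
--             answer+=1
--
--     return answer
-- ===== SOURCE B (Python) =====
-- def solution(n, lost, reserve):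
--     lost_set = set(lost)
--     res_set = set(reserve)
--     lost_s = sorted(lost_set - res_set)
--     res_s = sorted(res_set - lost_set)
--     answer = n - len(lost_s)
--     i = j = 0
--     while i < len(lost_s) and j < len(res_s):
--         l = lost_s[i]
--         r = res_s[j]
--         if r < l - 1:
--             j += 1
--         elif r == l - 1 or r == l + 1:
--             i += 1
--             j += 1
--             answer += 1
--         else:
--             i += 1
--     return answer
-- ===== Notes on version B (the rewrite author's own statement) =====
-- stated objective: faster
-- what changed: A scans and mutates the reserve list ('in' + '.remove') once per lost student (quadratic loop); B merges the two sorted deduplicated lists with a single two-pointer sweep, never searching or removing.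
import Mathlib
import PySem

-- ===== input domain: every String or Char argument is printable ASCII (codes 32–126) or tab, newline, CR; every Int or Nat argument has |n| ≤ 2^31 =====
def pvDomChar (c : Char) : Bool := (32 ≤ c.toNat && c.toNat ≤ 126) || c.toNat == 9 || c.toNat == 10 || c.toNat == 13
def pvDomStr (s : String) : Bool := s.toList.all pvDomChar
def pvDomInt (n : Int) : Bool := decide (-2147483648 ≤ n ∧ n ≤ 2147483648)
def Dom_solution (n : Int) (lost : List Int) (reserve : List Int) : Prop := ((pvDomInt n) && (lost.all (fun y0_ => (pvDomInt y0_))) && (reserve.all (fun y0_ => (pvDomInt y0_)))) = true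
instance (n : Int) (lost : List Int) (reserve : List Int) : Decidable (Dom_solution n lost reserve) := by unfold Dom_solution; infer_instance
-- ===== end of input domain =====

-- B replaces A's repeated 'in'/'.remove' scans over the reserve list by a single
-- two-pointer sweep of the two sorted lists (objective: faster, constant/asymptotic on the loop).

-- ===== PORT A =====
-- for num in af_lost: check num-1 then num+1 in af_reserve, remove and count.
def pvLoopA : List Int → List Int → Int → Int
  | [], _, ans => ans
  | num :: rest, res, ans =>
    if (num - 1) ∈ res then pvLoopA rest (res.erase (num - 1)) (ans + 1)
    else if (num + 1) ∈ res then pvLoopA rest (res.erase (num + 1)) (ans + 1)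
    else pvLoopA rest res ans

def solution (n : Int) (lost : List Int) (reserve : List Int) : Int :=
  let afLost := PySem.List.sorted (PySem.Set.diff (PySem.Set.ofList lost) (PySem.Set.ofList reserve)) (fun x => x) false
  let afReserve := PySem.List.sorted (PySem.Set.diff (PySem.Set.ofList reserve) (PySem.Set.ofList lost)) (fun x => x) false
  pvLoopA afLost afReserve (n - (afLost.length : Int))

-- ===== PORT B =====
-- two-pointer while loop over the two sorted lists; the suffixes lost.drop i / res.drop j are the state
def pvLoopB : List Int → List Int → Int → Int
  | [], _, ans => ans
  | _ :: _, [], ans => ans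
  | l :: ls, r :: rs, ans =>
    if r < l - 1 then pvLoopB (l :: ls) rs ans
    else if r = l - 1 ∨ r = l + 1 then pvLoopB ls rs (ans + 1)
    else pvLoopB ls (r :: rs) ans
  termination_by lost res _ => lost.length + res.length
  decreasing_by all_goals (simp only [List.length_cons]; omega)

def solution_alt (n : Int) (lost : List Int) (reserve : List Int) : Int :=
  let lostS := PySem.List.sorted (PySem.Set.diff (PySem.Set.ofList lost) (PySem.Set.ofList reserve)) (fun x => x) false
  let resS := PySem.List.sorted (PySem.Set.diff (PySem.Set.ofList reserve) (PySem.Set.ofList lost)) (fun x => x) false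
  pvLoopB lostS resS (n - (lostS.length : Int))

-- ===== PRECONDITION & SPEC =====
def Spec_solution (n : Int) (lost : List Int) (reserve : List Int) (out : Int) : Prop := out = solution_alt n lost reserve
instance (n : Int) (lost : List Int) (reserve : List Int) (out : Int) : Decidable (Spec_solution n lost reserve out) := by unfold Spec_solution; infer_instance

-- ===== CLAIM (what is proved, stated in full; the proofs are below) =====
def Claim_equal_solution : Prop := ∀ (n : Int) (lost : List Int) (reserve : List Int), Dom_solution n lost reserve → Spec_solution n lost reserve (solution n lost reserve)

-- ===== LEMMAS AND PROOFS =====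

lemma pvLoopA_cons (num : Int) (rest res : List Int) (ans : Int) :
    pvLoopA (num :: rest) res ans =
      (if (num - 1) ∈ res then pvLoopA rest (res.erase (num - 1)) (ans + 1)
       else if (num + 1) ∈ res then pvLoopA rest (res.erase (num + 1)) (ans + 1)
       else pvLoopA rest res ans) := rfl

lemma pvLoopB_cons_cons (l r : Int) (ls rs : List Int) (ans : Int) :
    pvLoopB (l :: ls) (r :: rs) ans =
      (if r < l - 1 then pvLoopB (l :: ls) rs ans
       else if r = l - 1 ∨ r = l + 1 then pvLoopB ls rs (ans + 1)
       else pvLoopB ls (r :: rs) ans) := by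
  rw [pvLoopB]

lemma pvLoopB_nil_lost (res : List Int) (ans : Int) : pvLoopB [] res ans = ans := by
  cases res <;> rw [pvLoopB]

lemma pvLoopB_nil_res (l : Int) (ls : List Int) (ans : Int) : pvLoopB (l :: ls) [] ans = ans := by
  rw [pvLoopB]

lemma pvLoopA_nil_res (lost : List Int) (ans : Int) : pvLoopA lost [] ans = ans := by
  induction lost with
  | nil => rfl
  | cons l ls ih => simp [pvLoopA, ih]

-- a reserve element smaller than every lost-1 is never touched by A's loop
lemma pvLoopA_skip (r : Int) (lost res : List Int) (ans : Int)
    (h : ∀ l ∈ lost, r < l - 1) :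
    pvLoopA lost (r :: res) ans = pvLoopA lost res ans := by
  induction lost generalizing res ans with
  | nil => rfl
  | cons l ls ih =>
    have h1 : r < l - 1 := h l (by simp)
    have hh : ∀ x ∈ ls, r < x - 1 := fun x hx => h x (by simp [hx])
    have m1 : ((l - 1) ∈ r :: res) ↔ ((l - 1) ∈ res) := by
      constructor
      · intro hm
        rcases List.mem_cons.mp hm with he | hm
        · omega
        · exact hm
      · exact List.mem_cons_of_mem _
    have m2 : ((l + 1) ∈ r :: res) ↔ ((l + 1) ∈ res) := by
      constructor
      · intro hm
        rcases List.mem_cons.mp hm with he | hm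
        · omega
        · exact hm
      · exact List.mem_cons_of_mem _
    have e1 : (r :: res).erase (l - 1) = r :: res.erase (l - 1) :=
      List.erase_cons_tail (by simp; omega)
    have e2 : (r :: res).erase (l + 1) = r :: res.erase (l + 1) :=
      List.erase_cons_tail (by simp; omega)
    rw [pvLoopA_cons, pvLoopA_cons]
    simp only [m1, m2, e1, e2]
    split_ifs with hm1 hm2
    · exact ih _ _ hh
    · exact ih _ _ hh
    · exact ih _ _ hh

lemma not_mem_of_lt_head {r x : Int} {rs : List Int}
    (hs : (r :: rs).Pairwise (· < ·)) (hx : x < r) : x ∉ r :: rs := by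
  rcases List.pairwise_cons.mp hs with ⟨hall, _⟩
  intro hmem
  rcases List.mem_cons.mp hmem with h | h
  · omega
  · have := hall x h; omega

lemma pvLoop_eq (lost res : List Int) (ans : Int)
    (hl : lost.Pairwise (· < ·)) (hr : res.Pairwise (· < ·))
    (hd : ∀ l ∈ lost, l ∉ res) :
    pvLoopA lost res ans = pvLoopB lost res ans := by
  induction lost generalizing res ans with
  | nil => rw [pvLoopB_nil_lost]; rfl
  | cons l ls ihl =>
    induction res generalizing ans with
    | nil => rw [pvLoopB_nil_res, pvLoopA_nil_res]
    | cons r rs ihr =>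
      have hl' : ls.Pairwise (· < ·) := (List.pairwise_cons.mp hl).2
      have hlall : ∀ x ∈ ls, l < x := (List.pairwise_cons.mp hl).1
      have hr' : rs.Pairwise (· < ·) := (List.pairwise_cons.mp hr).2
      have hrall : ∀ x ∈ rs, r < x := (List.pairwise_cons.mp hr).1
      by_cases h1 : r < l - 1
      · -- dead reserve element: both loops skip it
        have hskip : ∀ x ∈ l :: ls, r < x - 1 := by
          intro x hx
          rcases List.mem_cons.mp hx with h | h
          · omega
          · have := hlall x h; omega
        rw [pvLoopA_skip r (l :: ls) rs ans hskip,
            pvLoopB_cons_cons, if_pos h1]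
        exact ihr ans hr' (fun x hx hm => hd x hx (List.mem_cons_of_mem _ hm))
      · by_cases h2 : r = l - 1
        · -- front match at the head of the reserve
          have hmem : l - 1 ∈ r :: rs := by simp [h2]
          have herase : (r :: rs).erase (l - 1) = rs := by
            subst h2; exact List.erase_cons_head _ _
          rw [pvLoopA_cons, if_pos hmem, herase,
              pvLoopB_cons_cons, if_neg h1, if_pos (Or.inl h2)]
          exact ihl rs (ans + 1) hl' hr'
            (fun x hx hm => hd x (List.mem_cons_of_mem _ hx) (List.mem_cons_of_mem _ hm))
        · by_cases h3 : r = l + 1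
          · -- back match at the head; l-1 < r cannot be in the sorted reserve
            have hno1 : l - 1 ∉ r :: rs := not_mem_of_lt_head hr (by omega)
            have hmem : l + 1 ∈ r :: rs := by simp [h3]
            have herase : (r :: rs).erase (l + 1) = rs := by
              subst h3; exact List.erase_cons_head _ _
            rw [pvLoopA_cons, if_neg hno1, if_pos hmem, herase,
                pvLoopB_cons_cons, if_neg h1, if_pos (Or.inr h3)]
            exact ihl rs (ans + 1) hl' hr'
              (fun x hx hm => hd x (List.mem_cons_of_mem _ hx) (List.mem_cons_of_mem _ hm))
          · -- r ≥ l + 2 (r ≠ l by disjointness): this lost student gets nothing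
            have hne : r ≠ l := fun h => hd l (by simp) (by simp [h.symm])
            have hno1 : l - 1 ∉ r :: rs := not_mem_of_lt_head hr (by omega)
            have hno2 : l + 1 ∉ r :: rs := not_mem_of_lt_head hr (by omega)
            rw [pvLoopA_cons, if_neg hno1, if_neg hno2,
                pvLoopB_cons_cons, if_neg h1, if_neg (by tauto)]
            exact ihl (r :: rs) ans hl' hr
              (fun x hx hm => hd x (List.mem_cons_of_mem _ hx) hm)

lemma pairwise_lt_sorted_diff (xs ys : List Int) :
    (PySem.List.sorted (PySem.Set.diff (PySem.Set.ofList xs) (PySem.Set.ofList ys)) (fun x => x) false).Pairwise (· < ·) := by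
  have hnd : (PySem.Set.diff (PySem.Set.ofList xs) (PySem.Set.ofList ys)).Nodup :=
    PySem.Set.nodup_diff _ _ (PySem.Set.nodup_ofList xs)
  have hperm := PySem.List.sorted_perm (PySem.Set.diff (PySem.Set.ofList xs) (PySem.Set.ofList ys)) (fun x => x) false
  have hnd' : (PySem.List.sorted (PySem.Set.diff (PySem.Set.ofList xs) (PySem.Set.ofList ys)) (fun x => x) false).Nodup :=
    hperm.nodup_iff.mpr hnd
  have hle := PySem.List.sorted_pairwise (PySem.Set.diff (PySem.Set.ofList xs) (PySem.Set.ofList ys)) (fun x => x)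
  exact (hle.and hnd').imp (fun h => lt_of_le_of_ne h.1 h.2)

-- ===== VERDICT (by name: the statement is the Claim_ definition above) =====
theorem solution_spec : Claim_equal_solution := by
  intro n lost reserve _
  unfold Spec_solution solution solution_alt
  apply pvLoop_eq
  · exact pairwise_lt_sorted_diff lost reserve
  · exact pairwise_lt_sorted_diff reserve lost
  · intro l hl hr
    have hl2 := ((PySem.Set.mem_diff _ _ l).mp ((PySem.List.mem_sorted _ _ _ _).mp hl)).1
    have hr2 := ((PySem.Set.mem_diff _ _ l).mp ((PySem.List.mem_sorted _ _ _ _).mp hr)).2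
    exact hr2 hl2
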